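-- pv_equiv track=rewrite | github.com/toheed-techlogix/R-TIE | src/parsing/parser.py | _strip_block_and_inline
-- ===== SOURCE A (Python) =====
-- def _strip_block_and_inline(line: str) -> str | None:
--     """Process a single line for ``/* */`` and ``--`` comments.
--
--     Returns the cleaned string, or ``None`` if the line opens a block comment
--     that is **not** closed on the same line (signalling the caller to enter
--     block-comment mode).
--     """
--     result_parts: list[str] = []
--     in_string = False
--     i = 0
--     length = len(line)
--
--     while i < length:
--         ch = line[i]
--
--         # Track string literals (single-quote delimited).
--         if ch == "'":
--             in_string = not in_string
--             result_parts.append(ch)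
--             i += 1
--             continue
--
--         if in_string:
--             result_parts.append(ch)
--             i += 1
--             continue
--
--         # -- single-line comment: discard the rest of the line.
--         if line[i:i + 2] == "--":
--             break
--
--         # /* block comment opener
--         if line[i:i + 2] == "/*":
--             close_pos = line.find("*/", i + 2)
--             if close_pos != -1:
--                 # Same-line close — skip from /* to */
--                 i = close_pos + 2
--                 continue
--             else:
--                 # Block comment opened but not closed on this line.
--                 return None
--
--         result_parts.append(ch)
--         i += 1
--
--     built = "".join(result_parts).rstrip()
--     # If the original line (stripped) was purely a -- comment, return "".
--     if not built.strip():
--         return ""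
--     return built
-- ===== SOURCE B (Python) =====
-- def _strip_block_and_inline(line: str) -> str | None:
--     """Marker-jumping re-implementation: instead of examining every character,
--     repeatedly str.find the next significant marker and copy plain chunks wholesale."""
--     parts: list[str] = []
--     i = 0
--     in_string = False
--     while True:
--         if in_string:
--             q = line.find("'", i)
--             if q == -1:
--                 parts.append(line[i:])
--                 break
--             parts.append(line[i:q + 1])
--             i = q + 1
--             in_string = False
--             continue
--         cands = [p for p in (line.find("'", i), line.find("--", i), line.find("/*", i)) if p != -1]
--         if not cands:
--             parts.append(line[i:])
--             break
--         m = min(cands)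
--         parts.append(line[i:m])
--         if line[m] == "'":
--             parts.append("'")
--             i = m + 1
--             in_string = True
--         elif line[m] == "-":
--             break
--         else:
--             close = line.find("*/", m + 2)
--             if close == -1:
--                 return None
--             i = close + 2
--     built = "".join(parts).rstrip()
--     if not built.strip():
--         return ""
--     return built
-- ===== Notes on version B (the rewrite author's own statement) =====
-- stated objective: faster
-- what changed: A walks the line one character at a time in a Python loop with an in_string flag; B repeatedly str.find's the next significant marker (quote, '--', '/*', or the closing quote when inside a string) and copies the plain chunks between markers wholesale, jumping straight past block comments.
import Mathlib
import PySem

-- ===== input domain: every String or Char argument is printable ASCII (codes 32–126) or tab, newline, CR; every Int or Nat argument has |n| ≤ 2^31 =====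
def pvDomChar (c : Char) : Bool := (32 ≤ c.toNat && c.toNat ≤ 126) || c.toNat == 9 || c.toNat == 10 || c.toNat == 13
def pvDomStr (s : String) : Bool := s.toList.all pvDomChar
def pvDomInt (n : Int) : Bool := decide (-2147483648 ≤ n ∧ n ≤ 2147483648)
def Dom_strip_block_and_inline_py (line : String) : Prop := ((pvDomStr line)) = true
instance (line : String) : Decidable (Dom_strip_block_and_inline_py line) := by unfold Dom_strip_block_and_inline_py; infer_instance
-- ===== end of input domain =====

-- B replaces A's character-at-a-time Python loop by a marker-jumping scan (str.find the next
-- significant marker, copy plain chunks wholesale); measured constant-factor faster.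

-- ===== PORT A =====
-- needed by the ports' termination proofs
theorem pvFind_lt_of_ne (cs pat : List Char) (hp : pat ≠ [])
    (h : PySem.Chars.find cs pat ≠ -1) :
    0 ≤ PySem.Chars.find cs pat ∧ (PySem.Chars.find cs pat).toNat < cs.length := by
  have hinf : pat <:+: cs := (PySem.Chars.find_ne_neg_one_iff cs pat).mp h
  have h0 : 0 ≤ PySem.Chars.find cs pat := (PySem.Chars.find_nonneg_iff cs pat).mpr hinf
  refine ⟨h0, ?_⟩
  have hpre := (PySem.Chars.find_spec h0).1
  have hlen : pat.length ≤ (cs.drop (PySem.Chars.find cs pat).toNat).length := hpre.length_le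
  have : 1 ≤ pat.length := by cases pat with | nil => simp at hp | cons a t => simp
  simp [List.length_drop] at hlen
  omega

-- literal port of A's while-loop over the remaining suffix of the line
def stripLoopA : List Char → Bool → List Char → Option (List Char)
  | [], _, acc => some acc
  | c :: rest, inStr, acc =>
    if c = '\'' then stripLoopA rest (!inStr) (acc ++ [c])
    else if inStr then stripLoopA rest inStr (acc ++ [c])
    else if ['-','-'].isPrefixOf (c :: rest) then some acc
    else if ['/','*'].isPrefixOf (c :: rest) then
      -- close_pos = line.find("*/", i + 2), kept relative to the suffix after "/*"
      let close := PySem.Chars.find (rest.drop 1) ['*','/']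
      if close = -1 then none
      else stripLoopA ((rest.drop 1).drop (close.toNat + 2)) inStr acc
    else stripLoopA rest inStr (acc ++ [c])
termination_by cs _ _ => cs.length
decreasing_by all_goals (simp [List.length_drop]; try omega)

def strip_block_and_inline_py (line : String) : Option String :=
  match stripLoopA line.toList false [] with
  | none => none
  | some parts =>
    let built := PySem.Chars.rstrip parts
    if PySem.Chars.strip built = [] then some "" else some (String.ofList built)

-- ===== PORT B =====
-- literal port of B's marker-jumping while-loop (positions kept relative to the remaining suffix)
def stripLoopB : List Char → Bool → List Char → Option (List Char)
  | cs, inStr, acc =>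
    if inStr then
      let q := PySem.Chars.find cs ['\'']
      if hq : q = -1 then some (acc ++ cs)
      else stripLoopB (cs.drop (q.toNat + 1)) false (acc ++ cs.take (q.toNat + 1))
    else
      match hm : PySem.List.min?
          (([PySem.Chars.find cs ['\''], PySem.Chars.find cs ['-','-'],
             PySem.Chars.find cs ['/','*']]).filter (fun p => p != -1)) (fun x => x) with
      | none => some (acc ++ cs)
      | some m =>
        if PySem.List.pyGet? cs m = some '\'' then
          stripLoopB (cs.drop (m.toNat + 1)) true ((acc ++ cs.take m.toNat) ++ ['\''])
        else if PySem.List.pyGet? cs m = some '-' then some (acc ++ cs.take m.toNat)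
        else
          let close := PySem.Chars.find (cs.drop (m.toNat + 2)) ['*','/']
          if close = -1 then none
          else stripLoopB (cs.drop (m.toNat + 2 + (close.toNat + 2))) false (acc ++ cs.take m.toNat)
termination_by cs _ _ => cs.length
decreasing_by
  · have h := pvFind_lt_of_ne cs ['\''] (by simp) hq
    simp [List.length_drop]; omega
  all_goals {
    have hmem := PySem.List.min?_mem hm
    simp [List.mem_filter] at hmem
    obtain ⟨hor, hne⟩ := hmem
    have hlt : 0 ≤ m ∧ m.toNat < cs.length := by
      rcases hor with h | h | h
      · exact h ▸ pvFind_lt_of_ne cs ['\''] (by simp) (h ▸ hne)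
      · exact h ▸ pvFind_lt_of_ne cs ['-','-'] (by simp) (h ▸ hne)
      · exact h ▸ pvFind_lt_of_ne cs ['/','*'] (by simp) (h ▸ hne)
    simp [List.length_drop]; omega
  }

def strip_block_and_inline_py_alt (line : String) : Option String :=
  match stripLoopB line.toList false [] with
  | none => none
  | some parts =>
    let built := PySem.Chars.rstrip parts
    if PySem.Chars.strip built = [] then some "" else some (String.ofList built)

-- ===== PRECONDITION & SPEC =====
def Spec_strip_block_and_inline_py (line : String) (out : Option String) : Prop := out = strip_block_and_inline_py_alt line
instance (line : String) (out : Option String) : Decidable (Spec_strip_block_and_inline_py line out) := by unfold Spec_strip_block_and_inline_py; infer_instance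

-- ===== CLAIM (what is proved, stated in full; the proofs are below) =====
def Claim_equal_strip_block_and_inline_py : Prop := ∀ (line : String), Dom_strip_block_and_inline_py line → Spec_strip_block_and_inline_py line (strip_block_and_inline_py line)

-- ===== LEMMAS AND PROOFS =====

theorem pv_take_app (t : List Char) (r : List Char) (j : Nat) :
    (t ++ r).take (t.length + j) = t ++ r.take j := by
  induction t with
  | nil => simp
  | cons a t ih => simp [Nat.succ_add, ih]

theorem pv_drop_app (t : List Char) (r : List Char) (j : Nat) :
    (t ++ r).drop (t.length + j) = r.drop j := by
  induction t with
  | nil => simp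
  | cons a t ih => simp [Nat.succ_add, ih]

theorem pv_no_prefix (pat cs : List Char) (h : PySem.Chars.find cs pat = -1) :
    ∀ k, ¬ pat <+: cs.drop k := by
  intro k hp
  exact (PySem.Chars.find_eq_neg_one_iff cs pat).mp h
    (hp.isInfix.trans (List.drop_suffix k cs).isInfix)

-- A consumes a marker-free chunk (outside a string) by copying it to the accumulator
theorem pvA_skip : ∀ (t r acc : List Char),
    (∀ k, k < t.length → ¬ ['\''] <+: (t ++ r).drop k ∧ ¬ ['-','-'] <+: (t ++ r).drop k ∧
      ¬ ['/','*'] <+: (t ++ r).drop k) →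
    stripLoopA (t ++ r) false acc = stripLoopA r false (acc ++ t) := by
  intro t
  induction t with
  | nil => intro r acc _; simp
  | cons c t ih =>
    intro r acc H
    have h0 := H 0 (by simp)
    simp only [List.drop_zero, List.cons_append] at h0
    have hc : ¬ (c = '\'') := fun h => h0.1 (by simp [h])
    have h2 : ¬ ((['-','-'].isPrefixOf (c :: (t ++ r))) = true) := by
      simpa [List.isPrefixOf_iff_prefix] using h0.2.1
    have h3 : ¬ ((['/','*'].isPrefixOf (c :: (t ++ r))) = true) := by
      simpa [List.isPrefixOf_iff_prefix] using h0.2.2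
    rw [List.cons_append, stripLoopA]
    simp only [hc, if_false, Bool.false_eq_true, h2, h3]
    rw [ih r (acc ++ [c]) (fun k hk => by simpa using H (k+1) (by simpa using hk))]
    simp

-- A copies everything up to the next quote while inside a string literal
theorem pvA_str : ∀ (t r acc : List Char),
    (∀ k, k < t.length → ¬ ['\''] <+: (t ++ r).drop k) →
    stripLoopA (t ++ r) true acc = stripLoopA r true (acc ++ t) := by
  intro t
  induction t with
  | nil => intro r acc _; simp
  | cons c t ih =>
    intro r acc H
    have h0 := H 0 (by simp)
    simp only [List.drop_zero, List.cons_append] at h0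
    have hc : ¬ (c = '\'') := fun h => h0 (by simp [h])
    rw [List.cons_append, stripLoopA]
    simp only [hc, if_false, if_true]
    rw [ih r (acc ++ [c]) (fun k hk => by simpa using H (k+1) (by simpa using hk))]
    simp

theorem loops_eq : ∀ (n : Nat) (cs : List Char), cs.length ≤ n → ∀ (inStr : Bool) (acc : List Char),
    stripLoopA cs inStr acc = stripLoopB cs inStr acc := by
  intro n
  induction n with
  | zero =>
    intro cs h inStr acc
    have hcs : cs = [] := List.length_eq_zero_iff.mp (Nat.le_zero.mp h)
    subst hcs
    have hf : ∀ pat : List Char, pat ≠ [] → PySem.Chars.find [] pat = -1 := by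
      intro pat hp
      rw [PySem.Chars.find_eq_neg_one_iff]
      simpa [List.infix_nil] using hp
    cases inStr with
    | true =>
      rw [stripLoopA, stripLoopB]
      simp [hf ['\''] (by simp)]
    | false =>
      rw [stripLoopA, stripLoopB]
      simp only [Bool.false_eq_true, if_false]
      rw [hf ['\''] (by simp), hf ['-','-'] (by simp), hf ['/','*'] (by simp)]
      simp [PySem.List.min?, List.filter]
  | succ n ih =>
    intro cs h inStr acc
    cases inStr with
    | true =>
      by_cases hq : PySem.Chars.find cs ['\''] = -1
      · have hA : stripLoopA (cs ++ []) true acc = stripLoopA [] true (acc ++ cs) :=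
          pvA_str cs [] acc (by
            intro k hk
            simpa using pv_no_prefix ['\''] cs hq k)
        rw [stripLoopB]
        simp only [if_true]
        rw [dif_pos hq]
        simpa [stripLoopA] using hA
      · obtain ⟨h0, hlt⟩ := pvFind_lt_of_ne cs ['\''] (by simp) hq
        obtain ⟨hpre, hmin⟩ := PySem.Chars.find_spec h0
        obtain ⟨u, hu⟩ := hpre
        set f : Int := PySem.Chars.find cs ['\''] with hfdef
        set t : List Char := cs.take f.toNat with htdef
        have hcs : cs = t ++ ('\'' :: u) := by
          rw [htdef, show ('\'' :: u : List Char) = ['\''] ++ u from rfl, hu,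
            List.take_append_drop]
        have htl : t.length = f.toNat := by
          rw [htdef]; simp [List.length_take]; omega
        have hA : stripLoopA cs true acc = stripLoopA ('\'' :: u) true (acc ++ t) := by
          conv_lhs => rw [hcs]
          exact pvA_str t ('\'' :: u) acc (fun k hk => by rw [← hcs]; exact hmin k (by omega))
        rw [hA, stripLoopA]
        simp only [Bool.not_true]
        rw [stripLoopB]
        simp only [if_true]
        rw [dif_neg hq]
        have hd : cs.drop (f.toNat + 1) = u := by
          rw [hcs, ← htl, pv_drop_app t ('\'' :: u) 1]; rfl
        have htk : cs.take (f.toNat + 1) = t ++ ['\''] := by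
          rw [hcs, ← htl, pv_take_app t ('\'' :: u) 1]; rfl
        rw [hd, htk]
        have hul : u.length ≤ n := by
          have : cs.length = t.length + (u.length + 1) := by rw [hcs]; simp
          omega
        rw [ih u hul false (acc ++ t ++ ['\''])]
        simp [List.append_assoc]
    | false =>
      rw [stripLoopB]
      simp only [Bool.false_eq_true, if_false]
      split
      next hm =>
        -- no marker remains: A copies the whole rest
        have hnil : List.filter (fun p => p != -1)
            [PySem.Chars.find cs ['\''], PySem.Chars.find cs ['-','-'],
             PySem.Chars.find cs ['/','*']] = [] := by
          cases hfil : List.filter (fun p => p != -1)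
              [PySem.Chars.find cs ['\''], PySem.Chars.find cs ['-','-'],
               PySem.Chars.find cs ['/','*']] with
          | nil => rfl
          | cons x xs =>
            rw [hfil, PySem.List.min?_id_cons] at hm
            simp at hm
        have hall := List.filter_eq_nil_iff.mp hnil
        have hf1 : PySem.Chars.find cs ['\''] = -1 := by
          have := hall _ (by simp : PySem.Chars.find cs ['\''] ∈ _)
          simpa using this
        have hf2 : PySem.Chars.find cs ['-','-'] = -1 := by
          have := hall _ (by simp : PySem.Chars.find cs ['-','-'] ∈ _)
          simpa using this
        have hf3 : PySem.Chars.find cs ['/','*'] = -1 := by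
          have := hall _ (by simp : PySem.Chars.find cs ['/','*'] ∈ _)
          simpa using this
        have hA : stripLoopA (cs ++ []) false acc = stripLoopA [] false (acc ++ cs) :=
          pvA_skip cs [] acc (by
            intro k hk
            refine ⟨?_, ?_, ?_⟩ <;> simp only [List.append_nil]
            · exact pv_no_prefix _ cs hf1 k
            · exact pv_no_prefix _ cs hf2 k
            · exact pv_no_prefix _ cs hf3 k)
        simpa [stripLoopA] using hA
      next m hm =>
        have hmem := PySem.List.min?_mem hm
        have hminall := PySem.List.min?_isMin hm
        simp only [List.mem_filter, List.mem_cons, List.not_mem_nil, or_false] at hmem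
        obtain ⟨hor, hneB⟩ := hmem
        have hne : m ≠ -1 := by simpa using hneB
        have hle1 : PySem.Chars.find cs ['\''] ≠ -1 → m ≤ PySem.Chars.find cs ['\''] :=
          fun hx => hminall _ (by simp [List.mem_filter, hx])
        have hle2 : PySem.Chars.find cs ['-','-'] ≠ -1 → m ≤ PySem.Chars.find cs ['-','-'] :=
          fun hx => hminall _ (by simp [List.mem_filter, hx])
        have hle3 : PySem.Chars.find cs ['/','*'] ≠ -1 → m ≤ PySem.Chars.find cs ['/','*'] :=
          fun hx => hminall _ (by simp [List.mem_filter, hx])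
        have h0lt : 0 ≤ m ∧ m.toNat < cs.length := by
          rcases hor with hh | hh | hh
          · exact hh ▸ pvFind_lt_of_ne cs ['\''] (by simp) (hh ▸ hne)
          · exact hh ▸ pvFind_lt_of_ne cs ['-','-'] (by simp) (hh ▸ hne)
          · exact hh ▸ pvFind_lt_of_ne cs ['/','*'] (by simp) (hh ▸ hne)
        have hnomark : ∀ k, k < m.toNat →
            ¬ ['\''] <+: cs.drop k ∧ ¬ ['-','-'] <+: cs.drop k ∧ ¬ ['/','*'] <+: cs.drop k := by
          intro k hk
          refine ⟨?_, ?_, ?_⟩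
          · by_cases hx : PySem.Chars.find cs ['\''] = -1
            · exact pv_no_prefix _ cs hx k
            · exact (PySem.Chars.find_spec (pvFind_lt_of_ne cs _ (by simp) hx).1).2 k
                (by have := hle1 hx; omega)
          · by_cases hx : PySem.Chars.find cs ['-','-'] = -1
            · exact pv_no_prefix _ cs hx k
            · exact (PySem.Chars.find_spec (pvFind_lt_of_ne cs _ (by simp) hx).1).2 k
                (by have := hle2 hx; omega)
          · by_cases hx : PySem.Chars.find cs ['/','*'] = -1
            · exact pv_no_prefix _ cs hx k
            · exact (PySem.Chars.find_spec (pvFind_lt_of_ne cs _ (by simp) hx).1).2 k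
                (by have := hle3 hx; omega)
        set t : List Char := cs.take m.toNat with htdef
        set r : List Char := cs.drop m.toNat with hrdef
        have hcs : cs = t ++ r := (List.take_append_drop m.toNat cs).symm
        have htl : t.length = m.toNat := by
          rw [htdef]; simp [List.length_take]; omega
        have hA : stripLoopA cs false acc = stripLoopA r false (acc ++ t) := by
          conv_lhs => rw [hcs]
          exact pvA_skip t r acc (fun k hk => by rw [← hcs]; exact hnomark k (by omega))
        have hget : PySem.List.pyGet? cs m = r.head? := by
          rw [← Int.toNat_of_nonneg h0lt.1, PySem.List.pyGet?_natCast, hrdef, List.head?_drop]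
        rcases hor with hh | hh | hh
        · -- next marker is a quote
          have hpre : ['\''] <+: r := by
            rw [hrdef, show m.toNat = (PySem.Chars.find cs ['\'']).toNat from by rw [hh]]
            exact (PySem.Chars.find_spec (hh ▸ h0lt.1)).1
          obtain ⟨u, hu⟩ := hpre
          have hr : r = '\'' :: u := hu.symm
          rw [hget, hr]
          simp only [List.head?_cons]
          have hd : cs.drop (m.toNat + 1) = u := by
            rw [hcs, hr, ← htl, pv_drop_app t ('\'' :: u) 1]; rfl
          have hA2 : stripLoopA cs false acc = stripLoopA u true ((acc ++ t) ++ ['\'']) := by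
            rw [hA, hr, stripLoopA]
            simp only [Bool.not_false]
            rw [if_pos trivial]
          have hul : u.length ≤ n := by
            have : cs.length = t.length + (u.length + 1) := by rw [hcs, hr]; simp
            omega
          rw [if_pos trivial, hA2, hd]
          exact ih u hul true (acc ++ t ++ ['\''])
        · -- next marker is "--": both stop, discarding the rest
          have hpre : ['-','-'] <+: r := by
            rw [hrdef, show m.toNat = (PySem.Chars.find cs ['-','-']).toNat from by rw [hh]]
            exact (PySem.Chars.find_spec (hh ▸ h0lt.1)).1
          obtain ⟨u, hu⟩ := hpre
          have hr : r = '-' :: '-' :: u := hu.symm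
          rw [hget, hr]
          simp only [List.head?_cons]
          rw [if_pos trivial, hA, hr, stripLoopA]
          simp
        · -- next marker opens a block comment
          have hpre : ['/','*'] <+: r := by
            rw [hrdef, show m.toNat = (PySem.Chars.find cs ['/','*']).toNat from by rw [hh]]
            exact (PySem.Chars.find_spec (hh ▸ h0lt.1)).1
          obtain ⟨u, hu⟩ := hpre
          have hr : r = '/' :: '*' :: u := hu.symm
          rw [hget, hr]
          simp only [List.head?_cons]
          have hd2 : cs.drop (m.toNat + 2) = u := by
            rw [hcs, hr, ← htl, pv_drop_app t ('/' :: '*' :: u) 2]; rfl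
          rw [hd2, hA, hr, stripLoopA]
          simp only [List.isPrefixOf, Bool.false_eq_true, if_false, List.drop_succ_cons,
            List.drop_zero]
          simp only [show ('/' = '\'') = False by simp, show (some '/' = some '\'') = False by simp,
            show (some '/' = some '-') = False by simp,
            show (('-' == '/' && ('-' == '*' && true)) = true) = False by simp,
            show (('/' == '/' && ('*' == '*' && true)) = true) = True by simp,
            if_false, if_true]
          by_cases hcl : PySem.Chars.find u ['*','/'] = -1
          · rw [if_pos hcl, if_pos hcl]
          · rw [if_neg hcl, if_neg hcl]
            have hidx : m.toNat + 2 + ((PySem.Chars.find u ['*','/']).toNat + 2) =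
                t.length + (2 + ((PySem.Chars.find u ['*','/']).toNat + 2)) := by omega
            have hd3 : cs.drop (m.toNat + 2 + ((PySem.Chars.find u ['*','/']).toNat + 2)) =
                u.drop ((PySem.Chars.find u ['*','/']).toNat + 2) := by
              rw [hcs, hr, hidx, pv_drop_app t ('/' :: '*' :: u) _,
                show 2 + ((PySem.Chars.find u ['*','/']).toNat + 2) =
                  ((PySem.Chars.find u ['*','/']).toNat + 2) + 1 + 1 from by omega,
                List.drop_succ_cons, List.drop_succ_cons]
            rw [hd3]
            have hul : (u.drop ((PySem.Chars.find u ['*','/']).toNat + 2)).length ≤ n := by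
              have : cs.length = t.length + (u.length + 2) := by rw [hcs, hr]; simp
              simp only [List.length_drop]
              omega
            rw [ih _ hul false (acc ++ cs.take m.toNat)]

-- ===== VERDICT (by name: the statement is the Claim_ definition above) =====
theorem strip_block_and_inline_py_spec : Claim_equal_strip_block_and_inline_py := by
  intro line _
  unfold Spec_strip_block_and_inline_py strip_block_and_inline_py strip_block_and_inline_py_alt
  rw [loops_eq line.toList.length line.toList le_rfl]
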